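-- pv_equiv track=rewrite | github.com/tarstars/algo_club | sandbox/users/tarstars/amazon_scenes/main.py | lengthEachScene
-- ===== SOURCE A (Python) =====
-- def lengthEachScene(inputList):
--     # WRITE YOUR CODE HERE
--
--     # for each letter find the rightmost position of this letter
--     rightmost = {}
--     for ind, letter in enumerate(inputList):
--         rightmost[letter] = ind
--
--     lengths_of_scenes = []
--     n = len(inputList)
--     ind = 0
--     while ind < n:
--         begin_of_scene = ind
--         next_ind = rightmost[inputList[ind]] + 1
--         while ind < n and ind < next_ind:
--             next_ind = max(next_ind, rightmost[inputList[ind]] + 1)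
--             ind += 1
--         lengths_of_scenes.append(next_ind - begin_of_scene)
--         ind = next_ind
--
--     return lengths_of_scenes
-- ===== SOURCE B (Python) =====
-- def lengthEachScene(inputList):
--     # record first and last index of every distinct element
--     first = {}
--     last = {}
--     for ind, letter in enumerate(inputList):
--         if letter not in first:
--             first[letter] = ind
--         last[letter] = ind
--     # one interval per distinct element, sorted by start; merge overlapping ones
--     intervals = sorted(((first[c], last[c]) for c in first), key=lambda iv: iv[0])
--     result = []
--     current = None
--     for begin, end in intervals:
--         if current is None:
--             current = (begin, end)
--         elif begin <= current[1]:
--             current = (current[0], max(current[1], end))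
--         else:
--             result.append(current[1] - current[0] + 1)
--             current = (begin, end)
--     if current is not None:
--         result.append(current[1] - current[0] + 1)
--     return result
-- ===== Notes on version B (the rewrite author's own statement) =====
-- stated objective: alternative
-- what changed: Replaces A's nested while-loops that greedily jump through positions extending next_ind with a build-then-merge algorithm: one pass records each distinct element's first and last index, the resulting intervals are sorted by start and overlapping ones merged, and merged interval lengths are the scene lengths.
import Mathlib
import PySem

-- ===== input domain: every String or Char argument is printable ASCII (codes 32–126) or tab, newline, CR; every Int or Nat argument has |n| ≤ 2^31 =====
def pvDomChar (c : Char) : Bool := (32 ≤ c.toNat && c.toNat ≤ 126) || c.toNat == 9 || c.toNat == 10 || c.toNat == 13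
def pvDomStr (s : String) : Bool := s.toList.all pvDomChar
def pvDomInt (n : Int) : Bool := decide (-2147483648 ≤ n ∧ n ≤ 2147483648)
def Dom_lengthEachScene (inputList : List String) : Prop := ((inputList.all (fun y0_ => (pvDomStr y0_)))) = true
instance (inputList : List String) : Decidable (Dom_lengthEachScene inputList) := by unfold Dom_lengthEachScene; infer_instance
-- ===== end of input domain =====

-- B replaces A's greedy nested-while jump scan with build intervals (first/last index per
-- distinct element), sort by start, merge overlapping; objective: alternative (same cost).

-- ===== PORT A =====
-- rightmost[letter] = ind over enumerate(inputList); all Python ints here are ≥ 0, so Nat is exact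
def pvRightmost (inputList : List String) : PySem.Dict String Nat :=
  inputList.zipIdx.foldl (fun d p => d.insert p.1 p.2) PySem.Dict.empty

-- inner while: while ind < n and ind < next_ind: next_ind = max(next_ind, rightmost[inputList[ind]]+1); ind += 1
-- (fuel ≥ n - ind suffices; l.getD ind "" is Python inputList[ind]: ind < n always; the dict key is always present)
def pvAInner (rm : PySem.Dict String Nat) (l : List String) (n : Nat) :
    Nat → Nat → Nat → Nat × Nat
  | 0, ind, next => (ind, next)
  | fuel+1, ind, next =>
    if ind < n ∧ ind < next then
      pvAInner rm l n fuel (ind+1) (max next (rm.getD (l.getD ind "") 0 + 1))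
    else (ind, next)

-- outer while: per scene, compute next_ind via the inner loop, append next_ind - begin, jump
def pvAOuter (rm : PySem.Dict String Nat) (l : List String) (n : Nat) :
    Nat → Nat → List Int → List Int
  | 0, _, acc => acc
  | fuel+1, ind, acc =>
    if ind < n then
      let nxt := (pvAInner rm l n (n+1) ind (rm.getD (l.getD ind "") 0 + 1)).2
      pvAOuter rm l n fuel nxt (acc ++ [(nxt : Int) - (ind : Int)])
    else acc

def lengthEachScene (inputList : List String) : List Int :=
  pvAOuter (pvRightmost inputList) inputList inputList.length (inputList.length + 1) 0 []

-- ===== PORT B =====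
-- first/last index of every distinct element, built in one pass (indices ≥ 0: Nat is exact)
def pvFirstLast (l : List String) : PySem.Dict String Nat × PySem.Dict String Nat :=
  l.zipIdx.foldl
    (fun fl p =>
      (if fl.1.contains p.1 then fl.1 else fl.1.insert p.1 p.2, fl.2.insert p.1 p.2))
    (PySem.Dict.empty, PySem.Dict.empty)

-- sorted(((first[c], last[c]) for c in first), key=lambda iv: iv[0])
def pvIntervals (l : List String) : List (Nat × Nat) :=
  PySem.List.sorted
    ((pvFirstLast l).1.keys.map (fun c => ((pvFirstLast l).1.getD c 0, (pvFirstLast l).2.getD c 0)))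
    (fun iv => iv.1) false

-- the merge loop body over state (result, current)
def pvMergeStep (st : List Int × Option (Nat × Nat)) (iv : Nat × Nat) : List Int × Option (Nat × Nat) :=
  match st.2 with
  | none => (st.1, some iv)
  | some cur =>
    if iv.1 ≤ cur.2 then (st.1, some (cur.1, max cur.2 iv.2))
    else (st.1 ++ [(cur.2 : Int) - (cur.1 : Int) + 1], some iv)

-- run the merge loop from a state, then flush the pending interval
def pvMergeRun (ivs : List (Nat × Nat)) (st : List Int × Option (Nat × Nat)) : List Int :=
  let st' := ivs.foldl pvMergeStep st
  match st'.2 with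
  | none => st'.1
  | some cur => st'.1 ++ [(cur.2 : Int) - (cur.1 : Int) + 1]

def lengthEachScene_alt (inputList : List String) : List Int :=
  pvMergeRun (pvIntervals inputList) ([], none)

-- ===== PRECONDITION & SPEC =====
def Spec_lengthEachScene (inputList : List String) (out : List Int) : Prop := out = lengthEachScene_alt inputList
instance (inputList : List String) (out : List Int) : Decidable (Spec_lengthEachScene inputList out) := by unfold Spec_lengthEachScene; infer_instance

-- ===== CLAIM (what is proved, stated in full; the proofs are below) =====
def Claim_equal_lengthEachScene : Prop := ∀ (inputList : List String), Dom_lengthEachScene inputList → Spec_lengthEachScene inputList (lengthEachScene inputList)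

-- ===== LEMMAS AND PROOFS =====

-- reference scanner: positions left to right, running max m, scene start s; emits at fixpoints
def pvRef (r : Nat → Nat) : Nat → Nat → List Nat → List Int
  | _, _, [] => []
  | s, m, i :: rest =>
    if max m (r i) = i then ((i + 1 : Int) - (s : Int)) :: pvRef r (i+1) (max m (r i)) rest
    else pvRef r s (max m (r i)) rest

def pvRfun (rm : PySem.Dict String Nat) (l : List String) : Nat → Nat :=
  fun j => rm.getD (l.getD j "") 0

-- ---- A = ref ----

lemma pvAInner_ref (rm : PySem.Dict String Nat) (l : List String) (n : Nat)
    (hr : ∀ j, j < n → j ≤ pvRfun rm l j ∧ pvRfun rm l j < n) :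
    ∀ fuel i next s, n ≤ i + fuel → i < next → next ≤ n → s ≤ i →
    ∃ e, pvAInner rm l n fuel i next = (e, e) ∧ i < e ∧ next ≤ e ∧ e ≤ n ∧
      pvRef (pvRfun rm l) s (next - 1) (List.range' i (n - i)) =
        ((e : Int) - (s : Int)) :: pvRef (pvRfun rm l) e (e - 1) (List.range' e (n - e)) := by
  intro fuel
  induction fuel with
  | zero => intro i next s h1 h2 h3 _; omega
  | succ fuel ih =>
    intro i next s h1 h2 h3 hs
    have hin : i < n := lt_of_lt_of_le h2 h3
    have hri := hr i hin
    have hru : pvRfun rm l i = rm.getD (l.getD i "") 0 := rfl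
    rw [pvAInner, if_pos ⟨hin, h2⟩]
    have hn'le : max next (rm.getD (l.getD i "") 0 + 1) ≤ n := by
      have := hri.2; rw [hru] at this; omega
    have hrange : List.range' i (n - i) = i :: List.range' (i+1) (n-(i+1)) := by
      have : n - i = (n - (i+1)) + 1 := by omega
      rw [this, List.range'_succ]
    rw [hrange]
    have hm : max (next - 1) (pvRfun rm l i) = max next (rm.getD (l.getD i "") 0 + 1) - 1 := by
      rw [hru]; omega
    by_cases hcase : i + 1 = max next (rm.getD (l.getD i "") 0 + 1)
    · refine ⟨i + 1, ?_, by omega, by omega, by omega, ?_⟩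
      · cases fuel with
        | zero => simp [pvAInner, hcase]
        | succ f => rw [pvAInner, if_neg (by omega)]; rw [hcase]
      · rw [pvRef]
        have hmi : max (next - 1) (pvRfun rm l i) = i := by omega
        rw [if_pos hmi, hmi]
        norm_num
    · obtain ⟨e, he, h2', h3', h4', h5'⟩ :=
        ih (i+1) (max next (rm.getD (l.getD i "") 0 + 1)) s (by omega) (by omega) hn'le (by omega)
      refine ⟨e, he, by omega, by omega, h4', ?_⟩
      rw [pvRef]
      have hmi : ¬ max (next - 1) (pvRfun rm l i) = i := by omega
      rw [if_neg hmi, hm]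
      exact h5'


lemma pvAOuter_ref (rm : PySem.Dict String Nat) (l : List String) (n : Nat)
    (hr : ∀ j, j < n → j ≤ pvRfun rm l j ∧ pvRfun rm l j < n) :
    ∀ fuel ind acc m, n ≤ ind + fuel → m ≤ ind →
    pvAOuter rm l n fuel ind acc = acc ++ pvRef (pvRfun rm l) ind m (List.range' ind (n - ind)) := by
  intro fuel
  induction fuel with
  | zero =>
    intro ind acc m h1 h2
    have h0 : n - ind = 0 := by omega
    rw [h0]
    simp [pvAOuter, pvRef]
  | succ fuel ih =>
    intro ind acc m h1 h2
    by_cases hind : ind < n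
    · have hri := hr ind hind
      have hru : pvRfun rm l ind = rm.getD (l.getD ind "") 0 := rfl
      have hrange : List.range' ind (n - ind) = ind :: List.range' (ind+1) (n-(ind+1)) := by
        have : n - ind = (n - (ind+1)) + 1 := by omega
        rw [this, List.range'_succ]
      by_cases hcase : pvRfun rm l ind = ind
      · -- singleton scene at ind
        have hnxt : pvAInner rm l n (n+1) ind (rm.getD (l.getD ind "") 0 + 1) = (ind+1, ind+1) := by
          rw [← hru, hcase]
          rw [pvAInner, if_pos ⟨hind, by omega⟩]
          have hmax : max (ind + 1) (rm.getD (l.getD ind "") 0 + 1) = ind + 1 := by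
            rw [← hru, hcase]; omega
          rw [hmax]
          cases n with
          | zero => omega
          | succ n' => rw [pvAInner, if_neg (by omega)]
        rw [pvAOuter, if_pos hind]
        simp only [hnxt]
        rw [ih (ind+1) _ ind (by omega) (by omega)]
        rw [hrange, pvRef]
        have hmi : max m (pvRfun rm l ind) = ind := by omega
        rw [if_pos hmi, hmi]
        simp [List.append_assoc]
      · -- multi-step scene: use the inner-loop lemma
        obtain ⟨e, he, h2', h3', h4', h5'⟩ :=
          pvAInner_ref rm l n hr (n+1) ind (rm.getD (l.getD ind "") 0 + 1) ind
            (by omega) (by rw [← hru]; omega) (by rw [← hru]; have := hri.2; omega) (le_refl _)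
        rw [pvAOuter, if_pos hind]
        simp only [he]
        rw [ih e _ (e-1) (by omega) (by omega)]
        rw [hrange, pvRef] at h5' ⊢
        have hne : ¬ max m (pvRfun rm l ind) = ind := by omega
        have hne' : ¬ max (rm.getD (l.getD ind "") 0 + 1 - 1) (pvRfun rm l ind) = ind := by
          rw [← hru]; omega
        rw [if_neg hne]
        rw [if_neg hne'] at h5'
        have hmeq : max m (pvRfun rm l ind) = max (rm.getD (l.getD ind "") 0 + 1 - 1) (pvRfun rm l ind) := by
          rw [← hru]; omega
        rw [hmeq, h5']
        simp [List.append_assoc]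
    · rw [pvAOuter, if_neg hind]
      have h0 : n - ind = 0 := by omega
      rw [h0]
      simp [pvRef]

-- ---- dict characterizations ----

lemma pvRightmost_append (l : List String) (a : String) :
    pvRightmost (l ++ [a]) = (pvRightmost l).insert a l.length := by
  unfold pvRightmost
  rw [List.zipIdx_append, List.foldl_append]
  simp

lemma pvRightmost_spec (l : List String) :
    (∀ c k, (pvRightmost l).get? c = some k → k < l.length ∧ l.getD k "" = c) ∧
    (∀ i, i < l.length → ∃ k, (pvRightmost l).get? (l.getD i "") = some k ∧ i ≤ k) := by
  induction l using List.reverseRecOn with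
  | nil => simp [pvRightmost, PySem.Dict.get?_empty]
  | append_singleton l a ih =>
    obtain ⟨ih1, ih2⟩ := ih
    rw [pvRightmost_append]
    constructor
    · intro c k hk
      rw [PySem.Dict.get?_insert] at hk
      by_cases hca : c = a
      · rw [if_pos hca] at hk
        obtain rfl : l.length = k := by injection hk
        subst hca
        refine ⟨by simp, by simp [List.getD]⟩
      · rw [if_neg hca] at hk
        obtain ⟨h1, h2⟩ := ih1 c k hk
        exact ⟨by simp; omega, by rw [List.getD_append _ _ _ _ h1]; exact h2⟩
    · intro i hi
      simp at hi
      by_cases hil : i < l.length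
      · rw [List.getD_append _ _ _ _ hil]
        by_cases hca : l.getD i "" = a
        · rw [hca, PySem.Dict.get?_insert]
          exact ⟨l.length, by simp, by omega⟩
        · rw [PySem.Dict.get?_insert, if_neg hca]
          obtain ⟨k, hk, hik⟩ := ih2 i hil
          exact ⟨k, hk, hik⟩
      · obtain rfl : i = l.length := by omega
        refine ⟨l.length, ?_, le_refl _⟩
        have : (l ++ [a]).getD l.length "" = a := by simp [List.getD]
        rw [this, PySem.Dict.get?_insert, if_pos rfl]

lemma foldl_pair_split {α β γ : Type} (f : β → α → β) (g : γ → α → γ) :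
    ∀ (l : List α) (b : β) (c : γ),
    l.foldl (fun p x => (f p.1 x, g p.2 x)) (b, c) = (l.foldl f b, l.foldl g c) := by
  intro l
  induction l with
  | nil => intro b c; rfl
  | cons x t ih => intro b c; simp only [List.foldl_cons]; exact ih _ _

-- first-only fold, for reasoning about the first dict
def pvFirstD (l : List String) : PySem.Dict String Nat :=
  l.zipIdx.foldl (fun d p => if d.contains p.1 then d else d.insert p.1 p.2) PySem.Dict.empty

lemma pvFirstLast_eq (l : List String) : pvFirstLast l = (pvFirstD l, pvRightmost l) := by
  unfold pvFirstLast pvFirstD pvRightmost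
  exact foldl_pair_split
    (fun (d : PySem.Dict String Nat) (p : String × Nat) =>
      if d.contains p.1 then d else d.insert p.1 p.2)
    (fun (d : PySem.Dict String Nat) (p : String × Nat) => d.insert p.1 p.2) _ _ _

lemma pvFirstLast_snd (l : List String) : (pvFirstLast l).2 = pvRightmost l := by
  rw [pvFirstLast_eq]

lemma pvFirstD_append (l : List String) (a : String) :
    pvFirstD (l ++ [a]) =
      if (pvFirstD l).contains a then pvFirstD l else (pvFirstD l).insert a l.length := by
  unfold pvFirstD
  rw [List.zipIdx_append, List.foldl_append]
  simp

lemma pvFirst_spec (l : List String) :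
    (∀ c k, (pvFirstLast l).1.get? c = some k →
      k < l.length ∧ l.getD k "" = c ∧ ∀ j, j < k → l.getD j "" ≠ c) ∧
    (∀ i, i < l.length → ∃ k, (pvFirstLast l).1.get? (l.getD i "") = some k) ∧
    ((pvFirstLast l).1.keys.Pairwise
      (fun c c' => (pvFirstLast l).1.getD c 0 < (pvFirstLast l).1.getD c' 0)) ∧
    (l ≠ [] → ∃ ks, (pvFirstLast l).1.keys = (l.getD 0 "") :: ks) := by
  rw [pvFirstLast_eq]
  simp only []
  induction l using List.reverseRecOn with
  | nil => simp [pvFirstD, PySem.Dict.get?_empty]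
  | append_singleton l a ih =>
    obtain ⟨ih1, ih2, ih3, ih4⟩ := ih
    rw [pvFirstD_append]
    by_cases hc : (pvFirstD l).contains a
    · rw [if_pos hc]
      refine ⟨?_, ?_, ih3, ?_⟩
      · intro c k hk
        obtain ⟨h1, h2, h3⟩ := ih1 c k hk
        refine ⟨by simp; omega, by rw [List.getD_append _ _ _ _ h1]; exact h2, ?_⟩
        intro j hj
        rw [List.getD_append _ _ _ _ (by omega)]
        exact h3 j hj
      · intro i hi
        simp at hi
        by_cases hil : i < l.length
        · rw [List.getD_append _ _ _ _ hil]; exact ih2 i hil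
        · obtain rfl : i = l.length := by omega
          have ha : (l ++ [a]).getD l.length "" = a := by simp [List.getD]
          rw [ha]
          have := PySem.Dict.contains_eq_isSome_get? (pvFirstD l) a
          rw [hc] at this
          obtain ⟨k, hk⟩ := Option.isSome_iff_exists.mp this.symm
          exact ⟨k, hk⟩
      · intro _
        have hl : l ≠ [] := by
          rintro rfl
          simp [pvFirstD, PySem.Dict.contains_empty] at hc
        obtain ⟨ks, hks⟩ := ih4 hl
        have h0 : 0 < l.length := List.length_pos_iff.mpr hl
        rw [List.getD_append _ _ _ _ h0]
        exact ⟨ks, hks⟩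
    · rw [if_neg hc]
      have hcf : (pvFirstD l).contains a = false := eq_false_of_ne_true hc
      have hnotin : ∀ j, j < l.length → l.getD j "" ≠ a := by
        intro j hj hja
        obtain ⟨k, hk⟩ := ih2 j hj
        rw [hja] at hk
        have := PySem.Dict.contains_eq_isSome_get? (pvFirstD l) a
        rw [hk, hcf] at this
        simp at this
      refine ⟨?_, ?_, ?_, ?_⟩
      · intro c k hk
        rw [PySem.Dict.get?_insert] at hk
        by_cases hca : c = a
        · rw [if_pos hca] at hk
          obtain rfl : l.length = k := by injection hk
          subst hca
          refine ⟨by simp, by simp [List.getD], ?_⟩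
          intro j hj
          rw [List.getD_append _ _ _ _ hj]
          exact hnotin j hj
        · rw [if_neg hca] at hk
          obtain ⟨h1, h2, h3⟩ := ih1 c k hk
          refine ⟨by simp; omega, by rw [List.getD_append _ _ _ _ h1]; exact h2, ?_⟩
          intro j hj
          rw [List.getD_append _ _ _ _ (by omega)]
          exact h3 j hj
      · intro i hi
        simp at hi
        by_cases hil : i < l.length
        · rw [List.getD_append _ _ _ _ hil, PySem.Dict.get?_insert,
            if_neg (hnotin i hil)]
          exact ih2 i hil
        · obtain rfl : i = l.length := by omega
          have ha : (l ++ [a]).getD l.length "" = a := by simp [List.getD]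
          rw [ha, PySem.Dict.get?_insert, if_pos rfl]
          exact ⟨l.length, rfl⟩
      · rw [PySem.Dict.keys_insert_of_not_contains _ _ hcf]
        have hmem : ∀ c ∈ (pvFirstD l).keys, c ≠ a := by
          intro c hcm rfl
          rw [← PySem.Dict.contains_iff_mem_keys] at hcm
          rw [hcm] at hc
          exact hc rfl
        rw [List.pairwise_append]
        refine ⟨?_, by simp, ?_⟩
        · refine ih3.imp_of_mem ?_
          intro c c' hcm hcm' hlt
          rw [PySem.Dict.getD_insert, if_neg (hmem c hcm),
            PySem.Dict.getD_insert, if_neg (hmem c' hcm')]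
          exact hlt
        · intro c hcm c' hcm'
          simp at hcm'
          subst hcm'
          rw [PySem.Dict.getD_insert, if_neg (hmem c hcm),
            PySem.Dict.getD_insert, if_pos rfl]
          rw [← PySem.Dict.contains_iff_mem_keys] at hcm
          have := PySem.Dict.contains_eq_isSome_get? (pvFirstD l) c
          rw [hcm] at this
          obtain ⟨k, hk⟩ := Option.isSome_iff_exists.mp this.symm
          rw [PySem.Dict.getD_eq_get?_getD, hk]
          exact (ih1 c k hk).1
      · intro _
        rw [PySem.Dict.keys_insert_of_not_contains _ _ hcf]
        by_cases hl : l = []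
        · subst hl
          simp [pvFirstD, PySem.Dict.keys_empty, List.getD]
        · obtain ⟨ks, hks⟩ := ih4 hl
          have h0 : 0 < l.length := List.length_pos_iff.mpr hl
          rw [List.getD_append _ _ _ _ h0, hks]
          exact ⟨ks ++ [a], rfl⟩

-- ---- merge = ref (abstract over r) ----

lemma pvRef_gap_skip (r : Nat → Nat) (n : Nat) :
    ∀ k p s e, p + k ≤ e → e < n → (∀ i, p ≤ i → i < p + k → r i ≤ e) →
    pvRef r s e (List.range' p (n - p)) = pvRef r s e (List.range' (p + k) (n - (p + k))) := by
  intro k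
  induction k with
  | zero => intro p s e _ _ _; rfl
  | succ k ih =>
    intro p s e h1 h2 h3
    have hpn : p < n := by omega
    have hrange : List.range' p (n - p) = p :: List.range' (p+1) (n-(p+1)) := by
      have : n - p = (n - (p+1)) + 1 := by omega
      rw [this, List.range'_succ]
    rw [hrange, pvRef]
    have hrp : r p ≤ e := h3 p (le_refl _) (by omega)
    rw [max_eq_left hrp, if_neg (by omega : ¬ e = p)]
    have := ih (p+1) s e (by omega) h2 (fun i hi1 hi2 => h3 i (by omega) (by omega))
    rw [this, show p + 1 + k = p + (k+1) from by omega]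

lemma pvRef_gap_emit (r : Nat → Nat) (n : Nat) :
    ∀ k p s e, p + k = e + 1 → p ≤ e → e < n → (∀ i, p ≤ i → i ≤ e → i ≤ r i ∧ r i ≤ e) →
    pvRef r s e (List.range' p (n - p)) =
      ((e : Int) - (s : Int) + 1) :: pvRef r (e+1) e (List.range' (e+1) (n - (e+1))) := by
  intro k p s e h1 h2 h3 h4
  have hskip := pvRef_gap_skip r n (e - p) p s e (by omega) h3
    (fun i hi1 hi2 => (h4 i hi1 (by omega)).2)
  rw [hskip]
  have hpe : p + (e - p) = e := by omega
  rw [hpe]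
  have hrange : List.range' e (n - e) = e :: List.range' (e+1) (n-(e+1)) := by
    have : n - e = (n - (e+1)) + 1 := by omega
    rw [this, List.range'_succ]
  rw [hrange, pvRef]
  have hre : r e = e := by
    have := h4 e (by omega) (le_refl _); omega
  have hmax : max e (r e) = e := by rw [hre, max_self]
  rw [hmax, if_pos rfl]
  congr 1
  omega

lemma pvMerge_ref (r : Nat → Nat) (n : Nat)
    (hr : ∀ j, j < n → j ≤ r j ∧ r j < n) :
    ∀ (ivs : List (Nat × Nat)) (res : List Int) (s e p : Nat),
    ivs.Pairwise (fun a b => a.1 < b.1) →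
    (∀ iv ∈ ivs, p ≤ iv.1 ∧ iv.1 ≤ iv.2 ∧ iv.2 < n ∧ r iv.1 = iv.2) →
    (∀ i, p ≤ i → i < n → r i ≤ e ∨ ∃ iv ∈ ivs, iv.1 ≤ i ∧ r i = iv.2) →
    (∀ iv ∈ ivs, ∀ j, j < iv.1 → r j ≠ iv.1) →
    s ≤ p → e < n → s ≤ e →
    ((p ≤ e → (∃ j, j < p ∧ r j = e) →
       pvMergeRun ivs (res, some (s, e)) = res ++ pvRef r s e (List.range' p (n - p))) ∧
     (p = e + 1 →
       pvMergeRun ivs (res, some (s, e)) =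
         res ++ ((e : Int) - (s : Int) + 1) :: pvRef r p e (List.range' p (n - p)))) := by
  intro ivs
  induction ivs with
  | nil =>
    intro res s e p _ _ hcov _ hsp hen hse
    have hflush : pvMergeRun [] (res, some (s, e)) = res ++ [(e : Int) - (s : Int) + 1] := rfl
    constructor
    · intro hpe _
      have hne : n = e + 1 := by
        by_contra h
        have h2 : e + 1 < n := by omega
        have hr2 := hr (e+1) h2
        rcases hcov (e+1) (by omega) h2 with h3 | ⟨iv, hm, _⟩
        · omega
        · cases hm
      rw [hflush, pvRef_gap_emit r n (e+1-p) p s e (by omega) hpe hen ?side]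
      · rw [hne]
        simp [pvRef]
      · intro i hi1 hi2
        refine ⟨(hr i (by omega)).1, ?_⟩
        rcases hcov i hi1 (by omega) with h3 | ⟨iv, hm, _⟩
        · exact h3
        · cases hm
    · intro hp
      have h0 : n - p = 0 := by
        by_contra h
        have h2 : p < n := by omega
        have hr2 := hr p h2
        rcases hcov p (le_refl _) h2 with h3 | ⟨iv, hm, _⟩
        · omega
        · cases hm
      rw [hflush, h0]
      simp [pvRef]
  | cons iv t ih =>
    obtain ⟨f, ee⟩ := iv
    intro res s e p hpair hiv hcov h6 hsp hen hse
    obtain ⟨hpf, hfee, heen, hrf⟩ := hiv (f, ee) (List.mem_cons_self)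
    replace hpf : p ≤ f := hpf
    replace hfee : f ≤ ee := hfee
    replace heen : ee < n := heen
    replace hrf : r f = ee := hrf
    have hpair' := (List.pairwise_cons.mp hpair).2
    have hhead : ∀ a' ∈ t, f < a'.1 := (List.pairwise_cons.mp hpair).1
    have hcons : ∀ st, pvMergeRun ((f,ee) :: t) st = pvMergeRun t (pvMergeStep st (f,ee)) := by
      intro st; rfl
    have hivT : ∀ iv ∈ t, f + 1 ≤ iv.1 ∧ iv.1 ≤ iv.2 ∧ iv.2 < n ∧ r iv.1 = iv.2 := by
      intro iv hm
      have h1 := hhead iv hm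
      have h2 := hiv iv (List.mem_cons_of_mem _ hm)
      exact ⟨by omega, h2.2⟩
    have h6T : ∀ iv ∈ t, ∀ j, j < iv.1 → r j ≠ iv.1 := by
      intro iv hm j hj
      exact h6 iv (List.mem_cons_of_mem _ hm) j hj
    have hcovT : ∀ E, e ≤ E → ee ≤ E → ∀ i, f + 1 ≤ i → i < n →
        r i ≤ E ∨ ∃ iv ∈ t, iv.1 ≤ i ∧ r i = iv.2 := by
      intro E hE1 hE2 i hi1 hi2
      rcases hcov i (by omega) hi2 with h3 | ⟨iv, hm, hle, heq⟩
      · left; omega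
      · rcases List.mem_cons.mp hm with rfl | hm'
        · left; rw [heq]; omega
        · right; exact ⟨iv, hm', hle, heq⟩
    constructor
    · -- OPEN: p ≤ e, scene (s, e) still growing, ref before position p
      intro hpe hwit
      by_cases hfe : f ≤ e
      · -- absorb (f, ee) into the current scene
        have hfne : f ≠ e := by
          obtain ⟨j, hj, hje⟩ := hwit
          intro hfeq
          exact h6 (f, ee) List.mem_cons_self j (by omega) (by rw [hje]; omega)
        rw [hcons]
        have hstep : pvMergeStep (res, some (s, e)) (f, ee) = (res, some (s, max e ee)) := by
          simp [pvMergeStep, hfe]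
        rw [hstep]
        have hskip := pvRef_gap_skip r n (f - p) p s e (by omega) hen ?gap
        case gap =>
          intro i hi1 hi2
          rcases hcov i hi1 (by omega) with h3 | ⟨iv, hm, hle, _⟩
          · exact h3
          · rcases List.mem_cons.mp hm with rfl | hm'
            · omega
            · have := hhead iv hm'; omega
        rw [hskip, show p + (f - p) = f from by omega]
        have hrange : List.range' f (n - f) = f :: List.range' (f+1) (n-(f+1)) := by
          have : n - f = (n - (f+1)) + 1 := by omega
          rw [this, List.range'_succ]
        rw [hrange, pvRef]
        have hmax : max e (r f) = max e ee := by rw [hrf]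
        rw [hmax, if_neg (by omega : ¬ max e ee = f)]
        have hwit' : ∃ j, j < f + 1 ∧ r j = max e ee := by
          rcases Nat.lt_or_ge e ee with h | h
          · exact ⟨f, by omega, by rw [max_eq_right (le_of_lt h)]; exact hrf⟩
          · obtain ⟨j, hj, hje⟩ := hwit
            exact ⟨j, by omega, by rw [hje, max_eq_left h]⟩
        exact (ih res s (max e ee) (f+1) hpair' hivT
          (hcovT (max e ee) (by omega) (by omega)) h6T (by omega) (by omega) (by omega)).1
          (by omega) hwit'
      · -- f > e: the scene is complete; merge emits, ref emits at e
        rw [hcons]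
        have hstep : pvMergeStep (res, some (s, e)) (f, ee) =
            (res ++ [(e : Int) - (s : Int) + 1], some (f, ee)) := by
          simp [pvMergeStep]
          omega
        rw [hstep]
        rw [pvRef_gap_emit r n (e+1-p) p s e (by omega) hpe hen ?emithyp]
        case emithyp =>
          intro i hi1 hi2
          refine ⟨(hr i (by omega)).1, ?_⟩
          rcases hcov i hi1 (by omega) with h3 | ⟨iv, hm, hle, _⟩
          · exact h3
          · rcases List.mem_cons.mp hm with rfl | hm'
            · omega
            · have := hhead iv hm'; omega
        have hf : f = e + 1 := by
          by_contra h
          have h2 : e + 1 < n := by omega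
          have hr2 := hr (e+1) h2
          rcases hcov (e+1) (by omega) h2 with h3 | ⟨iv, hm, hle, _⟩
          · omega
          · rcases List.mem_cons.mp hm with rfl | hm'
            · omega
            · have := hhead iv hm'; omega
        subst hf
        have hrange : List.range' (e+1) (n - (e+1)) = (e+1) :: List.range' (e+1+1) (n-(e+1+1)) := by
          have : n - (e+1) = (n - (e+1+1)) + 1 := by omega
          rw [this, List.range'_succ]
        rw [hrange, pvRef]
        have hmax : max e (r (e+1)) = ee := by rw [hrf]; omega
        rw [hmax]
        by_cases hee : ee = e + 1
        · -- singleton scene: ref emits it immediately, merge keeps it pending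
          rw [if_pos hee]
          subst hee
          have hclosed := (ih (res ++ [(e : Int) - (s : Int) + 1]) (e+1) (e+1) (e+1+1)
            hpair' hivT (hcovT (e+1) (by omega) (by omega)) h6T
            (by omega) (by omega) (by omega)).2 rfl
          rw [hclosed]
          simp only [List.append_assoc, List.singleton_append]
          norm_num
        · -- the new scene is still open
          rw [if_neg hee]
          have hopen := (ih (res ++ [(e : Int) - (s : Int) + 1]) (e+1) ee (e+1+1)
            hpair' hivT (hcovT ee (by omega) (by omega)) h6T
            (by omega) (by omega) (by omega)).1 (by omega) ⟨e+1, by omega, hrf⟩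
          rw [hopen]
          simp only [List.append_assoc, List.singleton_append]
    · -- CLOSED: p = e + 1, ref has already emitted (s, e); merge emits now
      intro hp
      rw [hcons]
      have hstep : pvMergeStep (res, some (s, e)) (f, ee) =
          (res ++ [(e : Int) - (s : Int) + 1], some (f, ee)) := by
        simp [pvMergeStep]
        omega
      rw [hstep]
      have hf : f = p := by
        by_contra h
        have h2 : p < n := by omega
        have hr2 := hr p h2
        rcases hcov p (le_refl _) h2 with h3 | ⟨iv, hm, hle, _⟩
        · omega
        · rcases List.mem_cons.mp hm with rfl | hm'
          · omega
          · have := hhead iv hm'; omega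
      subst hp
      subst hf
      have hrange : List.range' (e+1) (n - (e+1)) = (e+1) :: List.range' (e+1+1) (n-(e+1+1)) := by
        have : n - (e+1) = (n - (e+1+1)) + 1 := by omega
        rw [this, List.range'_succ]
      rw [hrange, pvRef]
      have hmax : max e (r (e+1)) = ee := by rw [hrf]; omega
      rw [hmax]
      by_cases hee : ee = e + 1
      · rw [if_pos hee]
        subst hee
        have hclosed := (ih (res ++ [(e : Int) - (s : Int) + 1]) (e+1) (e+1) (e+1+1)
          hpair' hivT (hcovT (e+1) (by omega) (by omega)) h6T
          (by omega) (by omega) (by omega)).2 rfl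
        rw [hclosed]
        simp only [List.append_assoc, List.singleton_append]
        congr 3
        omega
      · rw [if_neg hee]
        have hopen := (ih (res ++ [(e : Int) - (s : Int) + 1]) (e+1) ee (e+1+1)
          hpair' hivT (hcovT ee (by omega) (by omega)) h6T
          (by omega) (by omega) (by omega)).1 (by omega) ⟨e+1, by omega, hrf⟩
        rw [hopen]
        simp only [List.append_assoc, List.singleton_append]

-- ---- assembly ----

theorem lengthEachScene_eq_alt (l : List String) : lengthEachScene l = lengthEachScene_alt l := by
  rcases eq_or_ne l [] with rfl | hl
  · rfl
  · have hnpos : 0 < l.length := List.length_pos_iff.mpr hl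
    obtain ⟨hA, hB⟩ := pvRightmost_spec l
    obtain ⟨hF1, hF2, hF3, hF4⟩ := pvFirst_spec l
    have hr : ∀ j, j < l.length → j ≤ pvRfun (pvRightmost l) l j ∧ pvRfun (pvRightmost l) l j < l.length := by
      intro j hj
      obtain ⟨k, hk, hjk⟩ := hB j hj
      have h1 := hA _ _ hk
      have hgd : pvRfun (pvRightmost l) l j = k := by
        unfold pvRfun
        rw [PySem.Dict.getD_eq_get?_getD, hk]
        rfl
      omega
    have hAside : lengthEachScene l =
        pvRef (pvRfun (pvRightmost l) l) 0 0 (List.range' 0 l.length) := by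
      unfold lengthEachScene
      rw [pvAOuter_ref (pvRightmost l) l l.length hr (l.length+1) 0 [] 0 (by omega) (le_refl 0)]
      simp
    -- B side: the sorted interval list is the raw first-occurrence-ordered list
    have hre : ∀ i, pvRfun (pvRightmost l) l i = (pvRightmost l).getD (l.getD i "") 0 :=
      fun i => rfl
    have hgetD : ∀ c k, (pvFirstLast l).1.get? c = some k → (pvFirstLast l).1.getD c 0 = k := by
      intro c k hk
      rw [PySem.Dict.getD_eq_get?_getD, hk]
      rfl
    have hRgetD : ∀ c k, (pvRightmost l).get? c = some k → (pvRightmost l).getD c 0 = k := by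
      intro c k hk
      rw [PySem.Dict.getD_eq_get?_getD, hk]
      rfl
    have hkeyfact : ∀ c ∈ (pvFirstLast l).1.keys,
        ∃ k k2, (pvFirstLast l).1.getD c 0 = k ∧ (pvRightmost l).getD c 0 = k2 ∧
          k ≤ k2 ∧ k2 < l.length ∧ l.getD k "" = c ∧ l.getD k2 "" = c ∧
          (∀ j, j < k → l.getD j "" ≠ c) := by
      intro c hc
      rw [← PySem.Dict.contains_iff_mem_keys] at hc
      have h1 := PySem.Dict.contains_eq_isSome_get? (pvFirstLast l).1 c
      rw [hc] at h1
      obtain ⟨k, hk⟩ := Option.isSome_iff_exists.mp h1.symm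
      obtain ⟨hk1, hk2, hk3⟩ := hF1 _ _ hk
      obtain ⟨k2, hk2', hkk2⟩ := hB k hk1
      rw [hk2] at hk2'
      obtain ⟨h21, h22⟩ := hA _ _ hk2'
      exact ⟨k, k2, hgetD _ _ hk, hRgetD _ _ hk2', hkk2, h21, hk2, h22, hk3⟩
    have hfirstmin : ∀ i, i < l.length → ∃ k, (pvFirstLast l).1.get? (l.getD i "") = some k ∧
        k ≤ i ∧ (pvFirstLast l).1.getD (l.getD i "") 0 = k := by
      intro i hi
      obtain ⟨k, hk⟩ := hF2 i hi
      obtain ⟨hk1, hk2, hk3⟩ := hF1 _ _ hk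
      refine ⟨k, hk, ?_, hgetD _ _ hk⟩
      by_contra h
      exact hk3 i (by omega) rfl
    -- the raw interval list
    set ivs := (pvFirstLast l).1.keys.map
      (fun c => ((pvFirstLast l).1.getD c 0, (pvFirstLast l).2.getD c 0)) with hivs
    have hpairivs : ivs.Pairwise (fun a b => a.1 < b.1) := by
      rw [hivs, List.pairwise_map]
      exact hF3
    have hsorted : pvIntervals l = ivs := by
      unfold pvIntervals
      exact PySem.List.sorted_eq_of_perm_of_pairwise_lt _ _ _ (List.Perm.refl _) hpairivs
    have hivmem : ∀ iv ∈ ivs, iv.1 ≤ iv.2 ∧ iv.2 < l.length ∧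
        pvRfun (pvRightmost l) l iv.1 = iv.2 ∧
        (∀ j, j < iv.1 → pvRfun (pvRightmost l) l j ≠ iv.1) := by
      intro iv hm
      rw [hivs, List.mem_map] at hm
      obtain ⟨c, hc, rfl⟩ := hm
      obtain ⟨k, k2, he1, he2, hkk2, h21, hk2, h22, hk3⟩ := hkeyfact c hc
      rw [pvFirstLast_snd]
      simp only [he1, he2]
      refine ⟨hkk2, h21, ?_, ?_⟩
      · rw [hre, hk2, he2]
      · intro j hj hcon
        have hjn : j < l.length := by omega
        obtain ⟨m, hm', hjm⟩ := hB j hjn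
        have hgm := hRgetD _ _ hm'
        have hrj : pvRfun (pvRightmost l) l j = m := by rw [hre, hgm]
        rw [hrj] at hcon
        subst hcon
        have := (hA _ _ hm').2
        have : l.getD j "" = c := by
          have h4 := (hA _ _ hm').2
          rw [hk2] at h4
          exact h4.symm ▸ rfl
        exact hk3 j hj this
    -- head of the interval list
    obtain ⟨ks, hks⟩ := hF4 hl
    have hc00 : (pvFirstLast l).1.getD (l.getD 0 "") 0 = 0 := by
      obtain ⟨k, hk, hki, hkd⟩ := hfirstmin 0 hnpos
      omega
    have hr0 : pvRfun (pvRightmost l) l 0 = (pvRightmost l).getD (l.getD 0 "") 0 := hre 0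
    have hivshead : ivs = (0, pvRfun (pvRightmost l) l 0) :: ks.map
        (fun c => ((pvFirstLast l).1.getD c 0, (pvFirstLast l).2.getD c 0)) := by
      rw [hivs, hks, List.map_cons, hc00, pvFirstLast_snd, hr0]
    -- coverage
    have hcov : ∀ i, 1 ≤ i → i < l.length →
        pvRfun (pvRightmost l) l i ≤ pvRfun (pvRightmost l) l 0 ∨
        ∃ iv ∈ ks.map (fun c => ((pvFirstLast l).1.getD c 0, (pvFirstLast l).2.getD c 0)),
          iv.1 ≤ i ∧ pvRfun (pvRightmost l) l i = iv.2 := by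
      intro i hi1 hi2
      obtain ⟨k, hk, hki, hkd⟩ := hfirstmin i hi2
      by_cases hcc : l.getD i "" = l.getD 0 ""
      · left
        rw [hre i, hre 0, hcc]
      · right
        have hmemk : l.getD i "" ∈ (pvFirstLast l).1.keys := by
          rw [← PySem.Dict.contains_iff_mem_keys,
            PySem.Dict.contains_eq_isSome_get?, hk]
          rfl
        rw [hks] at hmemk
        rcases List.mem_cons.mp hmemk with h | h
        · exact absurd h hcc
        · refine ⟨((pvFirstLast l).1.getD (l.getD i "") 0,
            (pvFirstLast l).2.getD (l.getD i "") 0), List.mem_map_of_mem h, ?_, ?_⟩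
          · omega
          · rw [pvFirstLast_snd, hre]
    -- run the merge
    have h6ivs : ∀ iv ∈ ivs, ∀ j, j < iv.1 → pvRfun (pvRightmost l) l j ≠ iv.1 := by
      intro iv hm
      exact (hivmem iv hm).2.2.2
    have hr0n : pvRfun (pvRightmost l) l 0 < l.length := (hr 0 hnpos).2
    have hBside : lengthEachScene_alt l =
        pvRef (pvRfun (pvRightmost l) l) 0 0 (List.range' 0 l.length) := by
      unfold lengthEachScene_alt
      rw [hsorted, hivshead]
      have hstep0 : pvMergeRun ((0, pvRfun (pvRightmost l) l 0) :: ks.map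
          (fun c => ((pvFirstLast l).1.getD c 0, (pvFirstLast l).2.getD c 0))) ([], none) =
          pvMergeRun (ks.map (fun c => ((pvFirstLast l).1.getD c 0, (pvFirstLast l).2.getD c 0)))
            ([], some (0, pvRfun (pvRightmost l) l 0)) := rfl
      rw [hstep0]
      have hrange0 : List.range' 0 l.length = 0 :: List.range' 1 (l.length - 1) := by
        have h1 : l.length = (l.length - 1) + 1 := by omega
        conv_lhs => rw [h1]
        rw [List.range'_succ]
      have hpairT : (ks.map (fun c => ((pvFirstLast l).1.getD c 0,
          (pvFirstLast l).2.getD c 0))).Pairwise (fun a b => a.1 < b.1) := by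
        have := hpairivs
        rw [hivshead] at this
        exact (List.pairwise_cons.mp this).2
      have hheadT := by
        have := hpairivs
        rw [hivshead] at this
        exact (List.pairwise_cons.mp this).1
      have hivT : ∀ iv ∈ ks.map (fun c => ((pvFirstLast l).1.getD c 0,
          (pvFirstLast l).2.getD c 0)), 1 ≤ iv.1 ∧ iv.1 ≤ iv.2 ∧ iv.2 < l.length ∧
          pvRfun (pvRightmost l) l iv.1 = iv.2 := by
        intro iv hm
        have hm' : iv ∈ ivs := by rw [hivshead]; exact List.mem_cons_of_mem _ hm
        have h1 := hivmem iv hm'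
        have h2 := hheadT iv hm
        exact ⟨by omega, h1.1, h1.2.1, h1.2.2.1⟩
      have h6T : ∀ iv ∈ ks.map (fun c => ((pvFirstLast l).1.getD c 0,
          (pvFirstLast l).2.getD c 0)), ∀ j, j < iv.1 → pvRfun (pvRightmost l) l j ≠ iv.1 := by
        intro iv hm
        exact h6ivs iv (by rw [hivshead]; exact List.mem_cons_of_mem _ hm)
      by_cases h0 : pvRfun (pvRightmost l) l 0 = 0
      · -- singleton first scene
        have hcov0 : ∀ i, 1 ≤ i → i < l.length →
            pvRfun (pvRightmost l) l i ≤ 0 ∨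
            ∃ iv ∈ ks.map (fun c => ((pvFirstLast l).1.getD c 0, (pvFirstLast l).2.getD c 0)),
              iv.1 ≤ i ∧ pvRfun (pvRightmost l) l i = iv.2 := by
          intro i hi1 hi2
          rcases hcov i hi1 hi2 with h | h
          · left; omega
          · right; exact h
        have hclosed := (pvMerge_ref (pvRfun (pvRightmost l) l) l.length hr
          (ks.map (fun c => ((pvFirstLast l).1.getD c 0, (pvFirstLast l).2.getD c 0)))
          [] 0 0 1 hpairT hivT hcov0 h6T
          (by omega) (by omega) (by omega)).2 rfl
        rw [h0, hclosed, hrange0, pvRef]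
        have hm0 : max 0 (pvRfun (pvRightmost l) l 0) = 0 := by omega
        rw [hm0, if_pos rfl]
        norm_num
      · -- first scene extends past position 0
        have hopen := (pvMerge_ref (pvRfun (pvRightmost l) l) l.length hr
          (ks.map (fun c => ((pvFirstLast l).1.getD c 0, (pvFirstLast l).2.getD c 0)))
          [] 0 (pvRfun (pvRightmost l) l 0) 1 hpairT hivT hcov h6T
          (by omega) hr0n (by omega)).1 (by omega) ⟨0, by omega, rfl⟩
        rw [hopen, hrange0, pvRef]
        have hm0 : max 0 (pvRfun (pvRightmost l) l 0) = pvRfun (pvRightmost l) l 0 := by omega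
        rw [hm0, if_neg h0]
        simp
    rw [hAside, hBside]

-- ===== VERDICT (by name: the statement is the Claim_ definition above) =====
theorem lengthEachScene_spec : Claim_equal_lengthEachScene := by
  intro l _
  unfold Spec_lengthEachScene
  exact lengthEachScene_eq_alt l
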